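-- pv_equiv track=rewrite | github.com/han-fengyan/THU_Combinatorics | generate_premutation.py | zhongjie_to_pailie
-- ===== SOURCE A (Python) =====
-- def zhongjie_to_pailie(zhongjie):##中介数转排列
--     pailie=[]
--     for i in range(len(zhongjie)):
--         temp=sorted(pailie)
--         pailie_new=zhongjie[i]+1
--         for j in temp:
--             if j<=pailie_new:
--                 pailie_new=pailie_new+1
--         pailie.append(pailie_new)
--     for i in range(len(pailie)+1):
--         if (i+1) not in pailie:
--             pailie.append(i+1)
--     return pailie
-- ===== SOURCE B (Python) =====
-- import bisect
--
-- def zhongjie_to_pailie(zhongjie):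
--     perm = []
--     s = []  # sorted copy of perm, kept via insort
--     for z in zhongjie:
--         v0 = z + 1
--         # least w in [v0, v0+len(s)] with w - (#elements of s <= w) >= v0
--         lo, hi = v0, v0 + len(s)
--         while lo < hi:
--             mid = (lo + hi) // 2
--             if mid - bisect.bisect_right(s, mid) >= v0:
--                 hi = mid
--             else:
--                 lo = mid + 1
--         perm.append(lo)
--         bisect.insort_right(s, lo)
--     used = set(perm)
--     return perm + [i + 1 for i in range(len(perm) + 1) if (i + 1) not in used]
-- ===== Notes on version B (the rewrite author's own statement) =====
-- stated objective: faster
-- what changed: A re-sorts the growing output and linearly cascades over it for every element, then fills missing values with repeated list membership; B maintains one sorted list with bisect.insort and finds each output value by integer binary search over a bisect-count fixed point, and fills missing values with a hash set.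
import Mathlib
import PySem

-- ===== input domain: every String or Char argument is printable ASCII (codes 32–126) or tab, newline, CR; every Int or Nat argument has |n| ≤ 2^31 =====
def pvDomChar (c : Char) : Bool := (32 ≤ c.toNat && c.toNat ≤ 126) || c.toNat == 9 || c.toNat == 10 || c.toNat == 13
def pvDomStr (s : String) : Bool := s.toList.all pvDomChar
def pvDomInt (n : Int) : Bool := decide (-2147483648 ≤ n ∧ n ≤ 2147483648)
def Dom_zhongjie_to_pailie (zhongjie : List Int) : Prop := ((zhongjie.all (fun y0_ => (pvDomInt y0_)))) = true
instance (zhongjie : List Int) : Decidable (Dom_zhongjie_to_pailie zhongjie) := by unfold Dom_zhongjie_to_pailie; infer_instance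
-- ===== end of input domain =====

-- B replaces A's per-step re-sort + linear cascade by one maintained sorted list with
-- bisect-insertion and an integer binary search, and the missing-value fill-up by a set:
-- objective 'faster' (measured).

-- ===== PORT A =====
def zhongjie_to_pailie (zhongjie : List Int) : List Int :=
  let pailie := zhongjie.foldl (fun pailie z =>
      let temp := PySem.List.sorted pailie (fun x => x)
      let pailie_new := temp.foldl
        (fun pailie_new j => if j ≤ pailie_new then pailie_new + 1 else pailie_new) (z + 1)
      pailie ++ [pailie_new]) []
  (PySem.List.pyRange 0 ((pailie.length : Int) + 1)).foldl
    (fun pailie i => if (i + 1) ∈ pailie then pailie else pailie ++ [i + 1]) pailie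

-- ===== PORT B =====
-- midpoint bounds, cited by pvSearch's decreasing_by
theorem pvMid_bounds {lo hi : Int} (h : lo < hi) :
    lo ≤ PySem.Int.floordiv (lo + hi) 2 ∧ PySem.Int.floordiv (lo + hi) 2 < hi := by
  constructor
  · exact (PySem.Int.floordiv_two_mid_bounds (le_of_lt h)).1
  · rw [PySem.Int.floordiv_lt_iff_lt_mul (by norm_num)]; omega

-- the while-loop of Source B: least w in [lo, hi] with w - bisect_right(s, w) ≥ v0
def pvSearch (s : List Int) (v0 lo hi : Int) : Int :=
  if h : lo < hi then
    if v0 ≤ PySem.Int.floordiv (lo + hi) 2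
            - (PySem.List.bisectRight s (PySem.Int.floordiv (lo + hi) 2) : Int) then
      pvSearch s v0 lo (PySem.Int.floordiv (lo + hi) 2)
    else pvSearch s v0 (PySem.Int.floordiv (lo + hi) 2 + 1) hi
  else lo
termination_by (hi - lo).toNat
decreasing_by
  · have := pvMid_bounds h; omega
  · have := pvMid_bounds h; omega

-- bisect.insort_right
def pvInsort (s : List Int) (v : Int) : List Int :=
  s.take (PySem.List.bisectRight s v) ++ v :: s.drop (PySem.List.bisectRight s v)

def zhongjie_to_pailie_alt (zhongjie : List Int) : List Int :=
  let ps := zhongjie.foldl (fun (ps : List Int × List Int) z =>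
      let v0 := z + 1
      let v := pvSearch ps.2 v0 v0 (v0 + (ps.2.length : Int))
      (ps.1 ++ [v], pvInsort ps.2 v)) ([], [])
  let perm := ps.1
  let used := PySem.Set.ofList perm
  perm ++ ((PySem.List.pyRange 0 ((perm.length : Int) + 1)).filter
      (fun i => !(PySem.Set.contains used (i + 1)))).map (fun i => i + 1)

-- ===== PRECONDITION & SPEC =====
def Spec_zhongjie_to_pailie (zhongjie : List Int) (out : List Int) : Prop := out = zhongjie_to_pailie_alt zhongjie
instance (zhongjie : List Int) (out : List Int) : Decidable (Spec_zhongjie_to_pailie zhongjie out) := by unfold Spec_zhongjie_to_pailie; infer_instance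

-- ===== CLAIM (what is proved, stated in full; the proofs are below) =====
def Claim_equal_zhongjie_to_pailie : Prop := ∀ (zhongjie : List Int), Dom_zhongjie_to_pailie zhongjie → Spec_zhongjie_to_pailie zhongjie (zhongjie_to_pailie zhongjie)

-- ===== LEMMAS AND PROOFS =====

-- number of elements of s that are ≤ w, as an Int
def pvCnt (s : List Int) (w : Int) : Int := (s.countP (fun y => decide (y ≤ w)) : Int)

lemma pvCnt_nonneg (s : List Int) (w : Int) : 0 ≤ pvCnt s w := Int.natCast_nonneg _

lemma pvCnt_le_length (s : List Int) (w : Int) : pvCnt s w ≤ (s.length : Int) := by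
  unfold pvCnt
  exact_mod_cast List.countP_le_length (l := s) (p := fun y => decide (y ≤ w))

lemma pvCnt_cons (j : Int) (t : List Int) (w : Int) :
    pvCnt (j :: t) w = pvCnt t w + if j ≤ w then 1 else 0 := by
  by_cases h : j ≤ w <;> simp [pvCnt, List.countP_cons, h]

lemma pvCnt_eq_zero {s : List Int} {w : Int} (h : ∀ x ∈ s, ¬ x ≤ w) : pvCnt s w = 0 := by
  simp only [pvCnt, Int.natCast_eq_zero]
  exact List.countP_eq_zero.mpr (by intro a ha; simpa using h a ha)

lemma pvCnt_pos_of_mem {s : List Int} {x w : Int} (hx : x ∈ s) (hxw : x ≤ w) :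
    1 ≤ pvCnt s w := by
  have h : 0 < s.countP (fun y => decide (y ≤ w)) :=
    List.countP_pos_iff.mpr ⟨x, hx, by simpa using hxw⟩
  unfold pvCnt
  exact_mod_cast h

lemma pvCnt_succ (s : List Int) (w : Int) :
    pvCnt s (w + 1) = pvCnt s w + (s.count (w + 1) : Int) := by
  induction s with
  | nil => simp [pvCnt]
  | cons a t ih =>
    rw [pvCnt_cons, pvCnt_cons, List.count_cons, ih]
    by_cases h : a = w + 1
    · subst h; simp; push_cast; omega
    · have h1 : (a ≤ w + 1) ↔ (a ≤ w) := by omega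
      simp [h, h1]
      split_ifs <;> push_cast <;> omega

lemma pvCnt_lip {s : List Int} (hnd : s.Nodup) :
    ∀ (k : Nat) (w w' : Int), w' - w = (k : Int) → pvCnt s w' - pvCnt s w ≤ w' - w := by
  intro k
  induction k with
  | zero => intro w w' hk; have : w' = w := by omega
            subst this; omega
  | succ k ih =>
    intro w w' hk
    have h1 : w' = (w' - 1) + 1 := by omega
    have hcnt : pvCnt s w' = pvCnt s (w' - 1) + (s.count w' : Int) := by
      conv_lhs => rw [h1]
      rw [pvCnt_succ]; rw [← h1]
    have hc1 : s.count w' ≤ 1 := List.nodup_iff_count_le_one.mp hnd w'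
    have := ih w (w' - 1) (by omega)
    omega

-- bisect_right on a sorted list counts the elements ≤ x
lemma pvBisect_eq {s : List Int} (hs : s.Pairwise (· ≤ ·)) (x : Int) :
    (PySem.List.bisectRight s x : Int) = pvCnt s x := by
  obtain ⟨hk, hlt, hgt⟩ := PySem.List.bisectRight_spec s x hs
  have hlen : (s.take (PySem.List.bisectRight s x)).length = PySem.List.bisectRight s x := by
    simp [List.length_take, Nat.min_eq_left hk]
  have h1 : (s.take (PySem.List.bisectRight s x)).countP (fun y => decide (y ≤ x))
      = PySem.List.bisectRight s x := by
    have hall : ∀ a ∈ s.take (PySem.List.bisectRight s x), (fun y => decide (y ≤ x)) a = true := by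
      intro a ha
      obtain ⟨i, hi, rfl⟩ := List.mem_iff_getElem.mp ha
      have hik : i < PySem.List.bisectRight s x := by
        have := hi; rw [hlen] at this; exact this
      have his : i < s.length := lt_of_lt_of_le hik hk
      rw [List.getElem_take]
      simpa using hlt i his hik
    rw [List.countP_eq_length.mpr hall, hlen]
  have h2 : (s.drop (PySem.List.bisectRight s x)).countP (fun y => decide (y ≤ x)) = 0 := by
    apply List.countP_eq_zero.mpr
    intro a ha
    obtain ⟨i, hi, rfl⟩ := List.mem_iff_getElem.mp ha
    rw [List.getElem_drop]
    have his : PySem.List.bisectRight s x + i < s.length := by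
      have := hi; rw [List.length_drop] at this; omega
    have := hgt (PySem.List.bisectRight s x + i) his (Nat.le_add_right _ _)
    simpa using not_le.mpr this
  have h3 : s.countP (fun y => decide (y ≤ x))
      = (s.take (PySem.List.bisectRight s x)).countP (fun y => decide (y ≤ x))
        + (s.drop (PySem.List.bisectRight s x)).countP (fun y => decide (y ≤ x)) := by
    conv_lhs => rw [← List.take_append_drop (PySem.List.bisectRight s x) s]
    rw [List.countP_append]
  unfold pvCnt
  rw [h3, h1, h2]
  simp

-- the cascade loop of A: result, fixed-point equation, minimality
lemma pvFold_id : ∀ (t : List Int) (v0 : Int), (∀ x ∈ t, ¬ x ≤ v0) →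
    t.foldl (fun v j => if j ≤ v then v + 1 else v) v0 = v0 := by
  intro t
  induction t with
  | nil => intro v0 _; rfl
  | cons a t ih =>
    intro v0 h
    have ha : ¬ a ≤ v0 := h a (List.mem_cons_self)
    simp only [List.foldl_cons, if_neg ha]
    exact ih v0 (fun x hx => h x (List.mem_cons_of_mem a hx))

lemma pvCascade_spec : ∀ (t : List Int) (v0 : Int), t.Pairwise (· ≤ ·) →
    v0 ≤ t.foldl (fun v j => if j ≤ v then v + 1 else v) v0 ∧
    t.foldl (fun v j => if j ≤ v then v + 1 else v) v0
      = v0 + pvCnt t (t.foldl (fun v j => if j ≤ v then v + 1 else v) v0) ∧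
    (∀ u, v0 ≤ u → u < t.foldl (fun v j => if j ≤ v then v + 1 else v) v0 →
      u - pvCnt t u < v0) := by
  intro t
  induction t with
  | nil =>
    intro v0 _
    refine ⟨le_refl _, by simp [pvCnt], ?_⟩
    intro u h1 h2; simp at h2; omega
  | cons j t ih =>
    intro v0 hp
    have hjt : ∀ x ∈ t, j ≤ x := (List.pairwise_cons.mp hp).1
    have hpt : t.Pairwise (· ≤ ·) := (List.pairwise_cons.mp hp).2
    by_cases hj : j ≤ v0
    · simp only [List.foldl_cons, if_pos hj]
      obtain ⟨ha, hb, hc⟩ := ih (v0 + 1) hpt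
      refine ⟨by omega, ?_, ?_⟩
      · rw [pvCnt_cons]
        have : j ≤ t.foldl (fun v j => if j ≤ v then v + 1 else v) (v0 + 1) := by omega
        rw [if_pos this]; omega
      · intro u hu1 hu2
        rw [pvCnt_cons, if_pos (by omega : j ≤ u)]
        by_cases hu : v0 + 1 ≤ u
        · have := hc u hu hu2; omega
        · have huv : u = v0 := by omega
          have := pvCnt_nonneg t u
          omega
    · simp only [List.foldl_cons, if_neg hj]
      have hgt : ∀ x ∈ t, ¬ x ≤ v0 := by
        intro x hx; have := hjt x hx; omega
      rw [pvFold_id t v0 hgt]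
      refine ⟨le_refl _, ?_, ?_⟩
      · rw [pvCnt_eq_zero (by intro x hx; rcases List.mem_cons.mp hx with h | h
                              · subst h; omega
                              · exact hgt x h)]
        omega
      · intro u h1 h2; omega

lemma pvSearch_ge : ∀ (k : Nat) (s : List Int) (v0 lo hi : Int), (hi - lo).toNat = k →
    lo ≤ pvSearch s v0 lo hi := by
  intro k
  induction k using Nat.strong_induction_on with
  | _ k ih =>
    intro s v0 lo hi hk
    rw [pvSearch]
    by_cases h : lo < hi
    · rw [dif_pos h]
      have hm := pvMid_bounds h
      split_ifs with h2
      · exact ih ((PySem.Int.floordiv (lo + hi) 2) - lo).toNat (by omega) s v0 lo _ rfl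
      · have := ih (hi - (PySem.Int.floordiv (lo + hi) 2 + 1)).toNat (by omega) s v0 _ hi rfl
        omega
    · rw [dif_neg h]

lemma pvSearch_spec : ∀ (k : Nat) (s : List Int) (v0 lo hi : Int), (hi - lo).toNat = k →
    s.Pairwise (· ≤ ·) → s.Nodup → lo ≤ hi →
    v0 ≤ hi - pvCnt s hi → (∀ u, u < lo → ¬ (v0 ≤ u - pvCnt s u)) →
    (v0 ≤ pvSearch s v0 lo hi - pvCnt s (pvSearch s v0 lo hi)) ∧
    (∀ u, u < pvSearch s v0 lo hi → ¬ (v0 ≤ u - pvCnt s u)) := by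
  intro k
  induction k using Nat.strong_induction_on with
  | _ k ih =>
    intro s v0 lo hi hk hs hnd hlohi hQhi hmin
    rw [pvSearch]
    by_cases h : lo < hi
    · rw [dif_pos h]
      have hm := pvMid_bounds h
      rw [pvBisect_eq hs]
      split_ifs with h2
      · exact ih _ (by omega) s v0 lo _ rfl hs hnd (by omega) h2 hmin
      · apply ih _ (by omega) s v0 _ hi rfl hs hnd (by omega) hQhi
        intro u hu hQu
        apply h2
        have hle : u ≤ PySem.Int.floordiv (lo + hi) 2 := by omega
        rcases eq_or_lt_of_le hle with heq | hlt'
        · subst heq; exact hQu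
        · have := pvCnt_lip hnd (PySem.Int.floordiv (lo + hi) 2 - u).toNat u
            (PySem.Int.floordiv (lo + hi) 2) (by omega)
          omega
    · rw [dif_neg h]
      have : lo = hi := by omega
      subst this
      exact ⟨hQhi, hmin⟩

-- the value produced is never already in the sorted list
lemma pvNotMem {s : List Int} (hnd : s.Nodup) {c v0 : Int}
    (hfix : c = v0 + pvCnt s c)
    (hmin : ∀ u, v0 ≤ u → u < c → u - pvCnt s u < v0) : c ∉ s := by
  intro hc
  have hpos : 1 ≤ pvCnt s c := pvCnt_pos_of_mem hc (le_refl c)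
  have hc1 : c = (c - 1) + 1 := by omega
  have hcount : s.count c = 1 := List.count_eq_one_of_mem hnd hc
  have hsucc : pvCnt s c = pvCnt s (c - 1) + 1 := by
    conv_lhs => rw [hc1]
    rw [pvCnt_succ, ← hc1, hcount]
    simp
  have := hmin (c - 1) (by omega) (by omega)
  omega

-- membership descriptions of the two halves cut by bisect_right
lemma pvInsort_sorted {s : List Int} (hs : s.Pairwise (· < ·)) {v : Int} (hv : v ∉ s) :
    (pvInsort s v).Pairwise (· < ·) ∧ (pvInsort s v).Perm (v :: s) := by
  have hle : s.Pairwise (· ≤ ·) := hs.imp le_of_lt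
  obtain ⟨hk, hlt, hgt⟩ := PySem.List.bisectRight_spec s v hle
  have htake : ∀ x ∈ s.take (PySem.List.bisectRight s v), x < v := by
    intro x hx
    obtain ⟨i, hi, rfl⟩ := List.mem_iff_getElem.mp hx
    have hik : i < PySem.List.bisectRight s v := by
      have := hi; rw [List.length_take, Nat.min_eq_left hk] at this; exact this
    have his : i < s.length := lt_of_lt_of_le hik hk
    rw [List.getElem_take]
    have h1 : s[i] ≤ v := hlt i his hik
    have h2 : s[i] ≠ v := by intro hh; apply hv; rw [← hh]; exact List.getElem_mem his
    omega
  have hdrop : ∀ x ∈ s.drop (PySem.List.bisectRight s v), v < x := by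
    intro x hx
    obtain ⟨i, hi, rfl⟩ := List.mem_iff_getElem.mp hx
    rw [List.getElem_drop]
    have his : PySem.List.bisectRight s v + i < s.length := by
      have := hi; rw [List.length_drop] at this; omega
    exact hgt _ his (Nat.le_add_right _ _)
  have hsplit : (s.take (PySem.List.bisectRight s v) ++ s.drop (PySem.List.bisectRight s v)).Pairwise (· < ·) := by
    rw [List.take_append_drop]; exact hs
  obtain ⟨hp1, hp2, hcross⟩ := List.pairwise_append.mp hsplit
  constructor
  · unfold pvInsort
    apply List.pairwise_append.mpr
    refine ⟨hp1, ?_, ?_⟩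
    · exact List.pairwise_cons.mpr ⟨hdrop, hp2⟩
    · intro x hx y hy
      rcases List.mem_cons.mp hy with h | h
      · subst h; exact htake x hx
      · exact hcross x hx y h
  · unfold pvInsort
    have hmid : (s.take (PySem.List.bisectRight s v) ++ v :: s.drop (PySem.List.bisectRight s v)).Perm
        (v :: (s.take (PySem.List.bisectRight s v) ++ s.drop (PySem.List.bisectRight s v))) :=
      List.perm_middle
    rw [List.take_append_drop] at hmid
    exact hmid

-- phase-1 invariant: B's pair is (A's list, sorted copy of it, strictly sorted)
lemma pvPhase1 : ∀ (zs : List Int) (pailie : List Int) (ps : List Int × List Int),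
    ps.1 = pailie → ps.2 = PySem.List.sorted pailie (fun x => x) → ps.2.Pairwise (· < ·) →
    (zs.foldl (fun (ps : List Int × List Int) z =>
        (ps.1 ++ [pvSearch ps.2 (z + 1) (z + 1) ((z + 1) + (ps.2.length : Int))],
         pvInsort ps.2 (pvSearch ps.2 (z + 1) (z + 1) ((z + 1) + (ps.2.length : Int))))) ps).1
      = zs.foldl (fun pailie z =>
          pailie ++ [(PySem.List.sorted pailie (fun x => x)).foldl
            (fun v j => if j ≤ v then v + 1 else v) (z + 1)]) pailie ∧
    (zs.foldl (fun (ps : List Int × List Int) z =>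
        (ps.1 ++ [pvSearch ps.2 (z + 1) (z + 1) ((z + 1) + (ps.2.length : Int))],
         pvInsort ps.2 (pvSearch ps.2 (z + 1) (z + 1) ((z + 1) + (ps.2.length : Int))))) ps).2.Pairwise (· < ·) ∧
    (zs.foldl (fun (ps : List Int × List Int) z =>
        (ps.1 ++ [pvSearch ps.2 (z + 1) (z + 1) ((z + 1) + (ps.2.length : Int))],
         pvInsort ps.2 (pvSearch ps.2 (z + 1) (z + 1) ((z + 1) + (ps.2.length : Int))))) ps).2
      = PySem.List.sorted (zs.foldl (fun pailie z =>
          pailie ++ [(PySem.List.sorted pailie (fun x => x)).foldl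
            (fun v j => if j ≤ v then v + 1 else v) (z + 1)]) pailie) (fun x => x) := by
  intro zs
  induction zs with
  | nil =>
    intro pailie ps h1 h2 h3
    simp only [List.foldl_nil]
    exact ⟨h1, h3, h2⟩
  | cons z zs ih =>
    intro pailie ps h1 h2 h3
    simp only [List.foldl_cons]
    set s := ps.2 with hs_def
    have hle : s.Pairwise (· ≤ ·) := h3.imp le_of_lt
    have hnd : s.Nodup := h3.imp ne_of_lt
    -- the cascade value
    set c := (PySem.List.sorted pailie (fun x => x)).foldl
      (fun v j => if j ≤ v then v + 1 else v) (z + 1) with hc_def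
    have hc_s : c = s.foldl (fun v j => if j ≤ v then v + 1 else v) (z + 1) := by
      rw [hc_def, h2]
    obtain ⟨hca, hcb, hcc⟩ := pvCascade_spec s (z + 1) hle
    rw [← hc_s] at hca hcb hcc
    -- the search value
    set r := pvSearch s (z + 1) (z + 1) ((z + 1) + (s.length : Int)) with hr_def
    have hge : (z + 1) ≤ r :=
      pvSearch_ge _ s (z + 1) (z + 1) ((z + 1) + (s.length : Int)) rfl

    obtain ⟨hra, hrb⟩ := pvSearch_spec (((z + 1) + (s.length : Int)) - (z + 1)).toNat s
      (z + 1) (z + 1) ((z + 1) + (s.length : Int)) rfl hle hnd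
      (by omega)
      (by have := pvCnt_le_length s ((z + 1) + (s.length : Int)); omega)
      (by intro u hu hQ; have := pvCnt_nonneg s u; omega)
    rw [← hr_def] at hra hrb
    -- c = r
    have hcr : c = r := by
      have h1' : r ≤ c := by
        by_contra hcon
        exact hrb c (by omega) (by omega)
      have h2' : c ≤ r := by
        by_contra hcon
        have := hcc r hge (by omega)
        omega
    
      omega
    -- new invariant
    have hnot : c ∉ s := pvNotMem hnd hcb hcc
    obtain ⟨hins_p, hins_perm⟩ := pvInsort_sorted h3 hnot
    have hperm : (pvInsort s c).Perm (pailie ++ [c]) := by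
      have h4 : s.Perm pailie := h2 ▸ PySem.List.sorted_perm pailie (fun x => x) false
      have h5 : (c :: s).Perm (c :: pailie) := List.Perm.cons c h4
      have h6 : (c :: pailie).Perm (pailie ++ [c]) := by
        rw [← List.singleton_append]
        exact List.perm_append_comm
      exact (hins_perm.trans h5).trans h6
    have hsorted_new : PySem.List.sorted (pailie ++ [c]) (fun x => x) = pvInsort s c :=
      PySem.List.sorted_eq_of_perm_of_pairwise_lt _ _ _ hperm hins_p
    exact ih (pailie ++ [c])
      (ps.1 ++ [r], pvInsort s r)
      (by rw [h1, hcr])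
      (by rw [← hcr, hsorted_new])
      (by rw [← hcr]; exact hins_p)

lemma pvContains_iff (p : List Int) (x : Int) :
    PySem.Set.contains (PySem.Set.ofList p) x = true ↔ x ∈ p := by
  rw [show (PySem.Set.contains (PySem.Set.ofList p) x = true) ↔ x ∈ PySem.Set.ofList p from by
    simp [PySem.Set.contains]]
  exact PySem.Set.mem_ofList p x

-- phase 2: the fill-up loop of A equals B's filtered comprehension
lemma pvPhase2 : ∀ (n : Nat) (p : List Int),
    (PySem.List.pyRange 0 ((n : Int))).foldl
      (fun acc i => if (i + 1) ∈ acc then acc else acc ++ [i + 1]) p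
    = p ++ ((PySem.List.pyRange 0 ((n : Int))).filter
        (fun i => !(PySem.Set.contains (PySem.Set.ofList p) (i + 1)))).map (fun i => i + 1) := by
  intro n
  induction n with
  | zero =>
    intro p
    simp [PySem.List.pyRange_one_eq_nil (le_refl 0)]
  | succ n ih =>
    intro p
    have hcast : ((n + 1 : Nat) : Int) = (n : Int) + 1 := by push_cast; ring
    rw [hcast, PySem.List.pyRange_one_succ_right (Int.natCast_nonneg n)]
    rw [List.foldl_append, List.filter_append, List.map_append, ih p]
    simp only [List.foldl_cons, List.foldl_nil, List.filter_cons, List.filter_nil]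
    have hM : ((n : Int) + 1) ∉ ((PySem.List.pyRange 0 ((n : Int))).filter
        (fun i => !(PySem.Set.contains (PySem.Set.ofList p) (i + 1)))).map (fun i => i + 1) := by
      intro hmem
      obtain ⟨i, hi, hieq⟩ := List.mem_map.mp hmem
      have := (PySem.List.mem_pyRange_one).mp (List.mem_of_mem_filter hi)
      omega
    by_cases hmem : ((n : Int) + 1) ∈ p
    · have hcond : ((n : Int) + 1) ∈ p ++ ((PySem.List.pyRange 0 ((n : Int))).filter
          (fun i => !(PySem.Set.contains (PySem.Set.ofList p) (i + 1)))).map (fun i => i + 1) :=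
        List.mem_append_left _ hmem
      rw [if_pos hcond]
      have : (!(PySem.Set.contains (PySem.Set.ofList p) ((n : Int) + 1))) = false := by
        simp [pvContains_iff p ((n : Int) + 1), hmem]
      rw [this]
      simp
    · have hcond : ((n : Int) + 1) ∉ p ++ ((PySem.List.pyRange 0 ((n : Int))).filter
          (fun i => !(PySem.Set.contains (PySem.Set.ofList p) (i + 1)))).map (fun i => i + 1) := by
        intro hh
        rcases List.mem_append.mp hh with h | h
        · exact hmem h
        · exact hM h
      rw [if_neg hcond]
      have : (!(PySem.Set.contains (PySem.Set.ofList p) ((n : Int) + 1))) = true := by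
        simp [pvContains_iff p ((n : Int) + 1), hmem]
      rw [this]
      simp

-- ===== VERDICT (by name: the statement is the Claim_ definition above) =====
theorem zhongjie_to_pailie_spec : Claim_equal_zhongjie_to_pailie := by
  intro zhongjie _
  simp only [Spec_zhongjie_to_pailie, zhongjie_to_pailie, zhongjie_to_pailie_alt]
  obtain ⟨h1, h2, h3⟩ := pvPhase1 zhongjie [] ([], [])
    rfl (by decide) List.Pairwise.nil
  rw [h1]
  set p := zhongjie.foldl (fun pailie z =>
      pailie ++ [(PySem.List.sorted pailie (fun x => x)).foldl
        (fun v j => if j ≤ v then v + 1 else v) (z + 1)]) [] with hp_def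
  have hcast : ((p.length : Int) + 1) = (((p.length + 1 : Nat)) : Int) := by push_cast; ring
  rw [hcast]
  rw [pvPhase2 (p.length + 1) p]
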